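-- pv_equiv track=rewrite | github.com/JosefKlain/Hangman | _1.4.24.py | F
-- ===== SOURCE A (Python) =====
-- def F(a):
--     i=0
--     while(i<len(a)-1 and a[i]<a[i+1]):
--         i+=1
--     if(i==len(a)-1 or i==0):
--         return -1
--     p=i
--     while(i<len(a)-1 and a[i]>a[i+1]):
--         i+=1
--     if(i==len(a)-1):
--         return p
--     return -1
-- ===== SOURCE B (Python) =====
-- def F(a):
--     n = len(a)
--     if n < 3:
--         return -1
--     p = a.index(max(a))
--     if p == 0 or p == n - 1:
--         return -1
--     if all(a[i] < a[i + 1] for i in range(p)) and all(a[i] > a[i + 1] for i in range(p, n - 1)):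
--         return p
--     return -1
-- ===== Notes on version B (the rewrite author's own statement) =====
-- stated objective: simpler
-- what changed: A's fused forward sweep with a mutating index and mid-stream early returns is replaced by argmax-then-verify: take the index of the global maximum, reject boundary peaks, and check the strict ascent and strict descent halves with two all() comprehensions.
import Mathlib
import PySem

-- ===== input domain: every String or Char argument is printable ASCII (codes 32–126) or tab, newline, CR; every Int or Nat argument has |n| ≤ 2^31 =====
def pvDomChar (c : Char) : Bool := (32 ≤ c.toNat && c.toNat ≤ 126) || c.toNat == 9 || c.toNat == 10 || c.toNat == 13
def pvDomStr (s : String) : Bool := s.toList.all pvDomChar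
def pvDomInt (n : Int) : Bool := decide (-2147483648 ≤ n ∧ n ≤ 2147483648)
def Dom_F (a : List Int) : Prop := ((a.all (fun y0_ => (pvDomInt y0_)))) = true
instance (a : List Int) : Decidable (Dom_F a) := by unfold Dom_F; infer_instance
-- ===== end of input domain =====

-- B replaces A's fused forward sweep by argmax-then-verify (simpler decomposition; same O(n) cost).
-- Every a[i] in both programs is guarded to be in range, so it is ported as a.getD i 0 (exact there).

-- ===== PORT A =====
-- first while loop: advance i while i<len(a)-1 and a[i]<a[i+1]
def ascend (a : List Int) (i : Nat) : Nat :=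
  if i < a.length - 1 ∧ a.getD i 0 < a.getD (i + 1) 0 then ascend a (i + 1) else i
termination_by a.length - i
decreasing_by omega

-- second while loop: advance i while i<len(a)-1 and a[i]>a[i+1]
def descend (a : List Int) (i : Nat) : Nat :=
  if i < a.length - 1 ∧ a.getD i 0 > a.getD (i + 1) 0 then descend a (i + 1) else i
termination_by a.length - i
decreasing_by omega

def F (a : List Int) : Int :=
  let i1 := ascend a 0
  if i1 = a.length - 1 ∨ i1 = 0 then -1
  else
    let p := i1
    let i2 := descend a p
    if i2 = a.length - 1 then (p : Int) else -1

-- ===== PORT B =====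
def F_alt (a : List Int) : Int :=
  if a.length < 3 then -1
  else
    match PySem.List.max? a (fun x => x) with    -- max(a); some since a ≠ []
    | none => -1
    | some m =>
      match PySem.List.index? a m with           -- a.index(max(a)); some since m ∈ a
      | none => -1
      | some p =>
        if p = 0 ∨ p = a.length - 1 then -1
        else if (List.range p).all (fun i => decide (a.getD i 0 < a.getD (i + 1) 0)) &&
                (List.range' p (a.length - 1 - p)).all (fun i => decide (a.getD i 0 > a.getD (i + 1) 0))
        then (p : Int)
        else -1

-- ===== PRECONDITION & SPEC =====
def Spec_F (a : List Int) (out : Int) : Prop := out = F_alt a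
instance (a : List Int) (out : Int) : Decidable (Spec_F a out) := by unfold Spec_F; infer_instance

-- ===== CLAIM (what is proved, stated in full; the proofs are below) =====
def Claim_equal_F : Prop := ∀ (a : List Int), Dom_F a → Spec_F a (F a)

-- ===== LEMMAS AND PROOFS =====

-- the bitonic predicate both programs recognise: strict ascent to p, strict descent after, p interior
def Good (a : List Int) (p : Nat) : Prop :=
  0 < p ∧ p < a.length - 1 ∧
  (∀ k, k < p → a.getD k 0 < a.getD (k + 1) 0) ∧
  (∀ k, p ≤ k → k < a.length - 1 → a.getD k 0 > a.getD (k + 1) 0)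

lemma ascend_spec (a : List Int) (i : Nat) :
    i ≤ ascend a i ∧
    (∀ k, i ≤ k → k < ascend a i → a.getD k 0 < a.getD (k + 1) 0) ∧
    ¬(ascend a i < a.length - 1 ∧ a.getD (ascend a i) 0 < a.getD (ascend a i + 1) 0) ∧
    (i ≤ a.length - 1 → ascend a i ≤ a.length - 1) := by
  fun_induction ascend a i with
  | case1 i h ih =>
    obtain ⟨h1, h2, h3, h4⟩ := ih
    refine ⟨by omega, ?_, h3, fun _ => h4 (by omega)⟩
    intro k hk hk'
    rcases Nat.eq_or_lt_of_le hk with rfl | hlt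
    · exact h.2
    · exact h2 k hlt hk'
  | case2 i h => exact ⟨le_rfl, by omega, h, fun hi => hi⟩

lemma descend_spec (a : List Int) (i : Nat) :
    i ≤ descend a i ∧
    (∀ k, i ≤ k → k < descend a i → a.getD k 0 > a.getD (k + 1) 0) ∧
    ¬(descend a i < a.length - 1 ∧ a.getD (descend a i) 0 > a.getD (descend a i + 1) 0) ∧
    (i ≤ a.length - 1 → descend a i ≤ a.length - 1) := by
  fun_induction descend a i with
  | case1 i h ih =>
    obtain ⟨h1, h2, h3, h4⟩ := ih
    refine ⟨by omega, ?_, h3, fun _ => h4 (by omega)⟩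
    intro k hk hk'
    rcases Nat.eq_or_lt_of_le hk with rfl | hlt
    · exact h.2
    · exact h2 k hlt hk'
  | case2 i h => exact ⟨le_rfl, by omega, h, fun hi => hi⟩

lemma ascend_eq (a : List Int) (i j : Nat) (hij : i ≤ j)
    (hasc : ∀ k, i ≤ k → k < j → a.getD k 0 < a.getD (k + 1) 0)
    (hjle : j ≤ a.length - 1)
    (hstop : ¬(j < a.length - 1 ∧ a.getD j 0 < a.getD (j + 1) 0)) :
    ascend a i = j := by
  fun_induction ascend a i with
  | case1 i h ih =>
    have hne : i ≠ j := by rintro rfl; exact hstop h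
    exact ih (by omega) (fun k hk hk' => hasc k (by omega) hk')
  | case2 i h =>
    by_contra hne
    have hilt : i < j := by omega
    exact h ⟨by omega, hasc i le_rfl hilt⟩

lemma descend_eq (a : List Int) (i j : Nat) (hij : i ≤ j)
    (hdesc : ∀ k, i ≤ k → k < j → a.getD k 0 > a.getD (k + 1) 0)
    (hjle : j ≤ a.length - 1)
    (hstop : ¬(j < a.length - 1 ∧ a.getD j 0 > a.getD (j + 1) 0)) :
    descend a i = j := by
  fun_induction descend a i with
  | case1 i h ih =>
    have hne : i ≠ j := by rintro rfl; exact hstop h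
    exact ih (by omega) (fun k hk hk' => hdesc k (by omega) hk')
  | case2 i h =>
    by_contra hne
    have hilt : i < j := by omega
    exact h ⟨by omega, hdesc i le_rfl hilt⟩

-- chained strict ascent / descent
lemma asc_chain (a : List Int) (p : Nat)
    (h : ∀ k, k < p → a.getD k 0 < a.getD (k + 1) 0) :
    ∀ k, k < p → a.getD k 0 < a.getD p 0 := by
  induction p with
  | zero => omega
  | succ q ih =>
    intro k hk
    rcases Nat.lt_succ_iff_lt_or_eq.mp hk with hlt | rfl
    · exact lt_trans (ih (fun k hk => h k (by omega)) k hlt) (h q (by omega))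
    · exact h k (by omega)

lemma desc_chain (a : List Int) (p : Nat)
    (h : ∀ k, p ≤ k → k < a.length - 1 → a.getD k 0 > a.getD (k + 1) 0) :
    ∀ k, p < k → k ≤ a.length - 1 → a.getD k 0 < a.getD p 0 := by
  intro k
  induction k with
  | zero => omega
  | succ q ih =>
    intro hk hk'
    rcases Nat.lt_succ_iff_lt_or_eq.mp hk with hlt | heq
    · exact lt_trans (h q (by omega) (by omega)) (ih hlt (by omega))
    · rw [heq]; exact h q (by omega) (by omega)

-- a Good peak dominates every other entry
lemma good_peak (a : List Int) (p : Nat) (h : Good a p) :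
    ∀ k, k < a.length → k ≠ p → a.getD k 0 < a.getD p 0 := by
  obtain ⟨h0, h1, hasc, hdesc⟩ := h
  intro k hk hne
  rcases Nat.lt_or_ge k p with hlt | hge
  · exact asc_chain a p hasc k hlt
  · exact desc_chain a p hdesc k (by omega) (by omega)

-- A returns p exactly on Good inputs, else -1
lemma F_cases (a : List Int) :
    F a = -1 ∨ (Good a (ascend a 0) ∧ F a = (ascend a 0 : Int)) := by
  unfold F
  by_cases h1 : ascend a 0 = a.length - 1 ∨ ascend a 0 = 0
  · left; simp [h1]
  · by_cases h2 : descend a (ascend a 0) = a.length - 1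
    · right
      push Not at h1
      obtain ⟨ha1, ha2, ha3, ha4⟩ := ascend_spec a 0
      obtain ⟨hd1, hd2, hd3, hd4⟩ := descend_spec a (ascend a 0)
      have hle : ascend a 0 ≤ a.length - 1 := ha4 (by omega)
      refine ⟨⟨by omega, by omega, fun k hk => ha2 k (by omega) hk, ?_⟩, by simp [h1, h2]⟩
      intro k hk hk'
      exact hd2 k hk (by omega)
    · left; simp [h1, h2]

lemma F_of_good (a : List Int) (p : Nat) (h : Good a p) : F a = (p : Int) := by
  obtain ⟨h0, h1, hasc, hdesc⟩ := h
  have hA : ascend a 0 = p := by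
    apply ascend_eq a 0 p (by omega) (fun k _ hk => hasc k hk) (by omega)
    rintro ⟨hp, hp'⟩
    exact absurd (hdesc p le_rfl hp) (by omega)
  have hD : descend a p = a.length - 1 := by
    apply descend_eq a p (a.length - 1) (by omega) (fun k hk hk' => hdesc k hk hk') le_rfl
    omega
  unfold F
  simp only [hA, hD]
  have : ¬(p = a.length - 1 ∨ p = 0) := by omega
  simp [this]

-- B returns p exactly on Good inputs, else -1
lemma F_alt_cases (a : List Int) :
    F_alt a = -1 ∨ ∃ p, Good a p ∧ F_alt a = (p : Int) := by
  unfold F_alt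
  split
  · left; rfl
  next hn =>
  split
  · left; rfl
  next m hm =>
  split
  · left; rfl
  next p hp =>
  split
  · left; rfl
  next hp0 =>
  have hplen : p < a.length := by
    obtain ⟨hk, _⟩ := PySem.List.getElem_of_index?_eq_some hp
    exact hk
  split
  next hchk =>
    right
    rw [Bool.and_eq_true] at hchk
    refine ⟨p, ⟨by omega, by omega, ?_, ?_⟩, rfl⟩
    · intro k hk
      have := (List.all_eq_true.mp hchk.1) k (List.mem_range.mpr hk)
      simpa using this
    · intro k hk hk'
      have hmem : k ∈ List.range' p (a.length - 1 - p) := by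
        rw [List.mem_range'_1]; omega
      have := (List.all_eq_true.mp hchk.2) k hmem
      simpa using this
  next => left; rfl

lemma F_alt_of_good (a : List Int) (p : Nat) (h : Good a p) : F_alt a = (p : Int) := by
  have hpk := good_peak a p h
  obtain ⟨h0, h1, hasc, hdesc⟩ := h
  have hplen : p < a.length := by omega
  unfold F_alt
  split
  next hn => omega
  next hn =>
  split
  next hm =>
    rw [PySem.List.max?_eq_none_iff] at hm
    subst hm; simp at hplen
  next m hm =>
  -- the maximum of a is a[p]
  have hmmem : m ∈ a := PySem.List.max?_mem hm
  have hmax : ∀ y ∈ a, y ≤ m := PySem.List.max?_isMax hm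
  obtain ⟨k, hk, hka⟩ := List.mem_iff_getElem.mp hmmem
  have hgd' : ∀ (j : ℕ) (hj : j < a.length), a.getD j 0 = a[j] :=
    fun j hj => List.getD_eq_getElem a 0 hj
  have hmval : m = a.getD p 0 := by
    by_cases hkp : k = p
    · subst hkp; rw [hgd' k hk]; exact hka.symm
    · have := hpk k hk hkp
      have hple : a.getD p 0 ≤ m := by
        rw [hgd' p hplen]; exact hmax _ (List.getElem_mem hplen)
      rw [hgd' k hk] at this; omega
  -- the first index of m in a is p
  have hidx : PySem.List.index? a m = some p := by
    rw [PySem.List.index?_eq_some_iff]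
    refine ⟨a.take p, a.drop (p + 1), ?_, by simp [hplen.le], ?_⟩
    · conv_lhs => rw [← List.take_append_drop p a]
      rw [List.drop_eq_getElem_cons hplen]
      rw [hmval, hgd' p hplen]
    · intro hmem
      obtain ⟨j, hj, hja⟩ := List.mem_iff_getElem.mp hmem
      have hjlen : j < p := by simpa [hplen.le] using hj
      have := hpk j (by omega) (by omega)
      rw [List.getElem_take] at hja
      rw [hgd' j (by omega)] at this
      omega
  split
  next hp => rw [hidx] at hp; cases hp
  next p' hp =>
  rw [hidx] at hp
  injection hp with hp
  subst hp
  split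
  next hp0 => omega
  next hp0 =>
  split
  · rfl
  next hchk =>
    exfalso
    apply hchk
    rw [Bool.and_eq_true]
    constructor
    · rw [List.all_eq_true]
      intro i hi
      simpa using hasc i (List.mem_range.mp hi)
    · rw [List.all_eq_true]
      intro i hi
      rw [List.mem_range'_1] at hi
      simpa using hdesc i hi.1 (by omega)

-- ===== VERDICT (by name: the statement is the Claim_ definition above) =====
theorem F_spec : Claim_equal_F := by
  intro a _
  unfold Spec_F
  rcases F_cases a with hF | ⟨hg, hF⟩
  · rcases F_alt_cases a with hB | ⟨p, hg, hB⟩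
    · rw [hF, hB]
    · rw [F_of_good a p hg] at hF
      omega
  · rw [hF, F_alt_of_good a _ hg]
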